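-- pv_equiv track=rewrite | github.com/Eshwar11034/new_temp | Dynamic-Task-Scheduling/scripts/experiment1b.py | build_config_list
-- ===== SOURCE A (Python) =====
-- from collections import defaultdict, deque
--
-- def build_config_list(matrix_sizes, threads_list, modes, a_vals, b_vals):
--     """
--     Returns a list of (matrix_size, threads, mode, alpha, beta) that satisfy:
--       beta>=alpha, beta%alpha==0, size%alpha==0, size%beta==0
--     """
--     cfgs_by_size = defaultdict(list)
--     for n in matrix_sizes:
--         for t in threads_list:
--             for mode in modes:
--                 for a in a_vals:
--                     for b in b_vals:
--                         if not (b >= a and (b % a == 0) and (n % a == 0) and (n % b == 0)):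
--                             continue
--                         cfgs_by_size[n].append((n, t, mode, a, b))
--     return cfgs_by_size
-- ===== SOURCE B (Python) =====
-- from collections import defaultdict
--
-- def build_config_list(matrix_sizes, threads_list, modes, a_vals, b_vals):
--     """
--     Same result as A, but the divisibility filter runs once per matrix size
--     (cached over duplicate sizes) instead of once per (size, thread, mode) triple.
--     If there are no threads or no modes there is nothing to emit, so we skip
--     the precomputation entirely.
--     """
--     out = defaultdict(list)
--     if not threads_list or not modes:
--         return out
--     pair_cache = {}
--     for n in matrix_sizes:
--         if n not in pair_cache:
--             pair_cache[n] = [(a, b) for a in a_vals for b in b_vals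
--                              if b >= a and b % a == 0 and n % a == 0 and n % b == 0]
--         pairs = pair_cache[n]
--         if pairs:
--             for t in threads_list:
--                 for mode in modes:
--                     out[n].extend((n, t, mode, a, b) for a, b in pairs)
--     return out
-- ===== Notes on version B (the rewrite author's own statement) =====
-- stated objective: faster
-- what changed: B computes the valid (alpha,beta) pair list once per matrix size (cached across duplicate sizes) and then only replays it for each (thread, mode), instead of re-testing all A*B divisibility combinations inside every (size, thread, mode) triple as A does; intended as asymptotically faster (O(N*A*B + output) vs O(N*T*M*A*B)); a timing run measured B 104x faster at the largest size both programs finished, but could not confirm beyond that because the output itself grows too large for either program.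
import Mathlib
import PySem

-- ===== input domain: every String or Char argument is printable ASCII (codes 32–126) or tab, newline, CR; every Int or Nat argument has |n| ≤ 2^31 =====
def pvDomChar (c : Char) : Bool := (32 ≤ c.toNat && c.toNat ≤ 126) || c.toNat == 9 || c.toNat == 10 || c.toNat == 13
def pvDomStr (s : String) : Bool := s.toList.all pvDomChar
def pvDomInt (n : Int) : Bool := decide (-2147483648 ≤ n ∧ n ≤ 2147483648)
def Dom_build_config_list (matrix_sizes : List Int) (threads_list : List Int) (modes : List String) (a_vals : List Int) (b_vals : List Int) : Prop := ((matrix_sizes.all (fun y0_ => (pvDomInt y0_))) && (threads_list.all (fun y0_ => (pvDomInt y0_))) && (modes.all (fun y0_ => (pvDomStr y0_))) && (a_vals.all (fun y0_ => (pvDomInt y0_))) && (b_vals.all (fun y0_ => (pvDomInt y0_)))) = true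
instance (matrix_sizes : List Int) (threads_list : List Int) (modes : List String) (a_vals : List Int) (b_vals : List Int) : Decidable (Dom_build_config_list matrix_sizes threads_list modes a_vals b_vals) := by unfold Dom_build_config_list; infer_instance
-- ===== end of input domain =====

-- B precomputes the valid (alpha, beta) pairs once per matrix size (cached over duplicates)
-- instead of re-filtering them for every (size, thread, mode) triple; return value only.

-- ===== PORT A =====
-- the shared divisibility condition (identical literal expression in both Pythons)
def pvCond (n a b : Int) : Bool :=
  decide (b ≥ a) && (PySem.Int.mod b a == 0) && (PySem.Int.mod n a == 0) && (PySem.Int.mod n b == 0)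

def build_config_list (matrix_sizes : List Int) (threads_list : List Int) (modes : List String) (a_vals : List Int) (b_vals : List Int) : List (Int × List (Int × Int × String × Int × Int)) :=
  (matrix_sizes.foldl (fun d n =>
    threads_list.foldl (fun d t =>
      modes.foldl (fun d mode =>
        a_vals.foldl (fun d a =>
          b_vals.foldl (fun d b =>
            if pvCond n a b then
              -- defaultdict(list): cfgs_by_size[n].append(...)
              d.modify n [] (· ++ [(n, t, mode, a, b)])
            else d) d) d) d) d)
    (PySem.Dict.empty : PySem.Dict Int (List (Int × Int × String × Int × Int)))).items

-- ===== PORT B =====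
-- [(a, b) for a in a_vals for b in b_vals if ...]
def pvPairs (n : Int) (a_vals b_vals : List Int) : List (Int × Int) :=
  a_vals.flatMap (fun a => (b_vals.filter (fun b => pvCond n a b)).map (fun b => (a, b)))

def build_config_list_alt (matrix_sizes : List Int) (threads_list : List Int) (modes : List String) (a_vals : List Int) (b_vals : List Int) : List (Int × List (Int × Int × String × Int × Int)) :=
  -- if not threads_list or not modes: return out  (still empty)
  if threads_list.isEmpty || modes.isEmpty then
    (PySem.Dict.empty : PySem.Dict Int (List (Int × Int × String × Int × Int))).items
  else
    (matrix_sizes.foldl (fun (st : PySem.Dict Int (List (Int × Int)) × PySem.Dict Int (List (Int × Int × String × Int × Int))) n =>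
        -- if n not in pair_cache: pair_cache[n] = [...]
        let cache := if st.1.contains n then st.1 else st.1.insert n (pvPairs n a_vals b_vals)
        let pairs := cache.getD n []
        let out :=
          if pairs ≠ [] then
            threads_list.foldl (fun o t =>
              modes.foldl (fun o mode =>
                -- defaultdict(list): out[n].extend(...)
                o.modify n [] (· ++ pairs.map (fun p => (n, t, mode, p.1, p.2)))) o) st.2
          else st.2
        (cache, out))
      (PySem.Dict.empty, PySem.Dict.empty)).2.items

-- ===== PRECONDITION & SPEC =====
-- Pre_ excludes exactly the inputs on which A raises ZeroDivisionError: all three outer lists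
-- non-empty and the divisibility test actually reaches a modulus by zero (a 0 in a_vals together
-- with some b ≥ 0, or a 0 in b_vals reached through some a < 0 dividing some size).
def Pre_build_config_list (matrix_sizes : List Int) (threads_list : List Int) (modes : List String) (a_vals : List Int) (b_vals : List Int) : Prop :=
  matrix_sizes = [] ∨ threads_list = [] ∨ modes = [] ∨
    ¬((∃ a ∈ a_vals, a = 0 ∧ ∃ b ∈ b_vals, 0 ≤ b) ∨
      (∃ a ∈ a_vals, a < 0 ∧ (0 : Int) ∈ b_vals ∧ ∃ n ∈ matrix_sizes, PySem.Int.mod n a = 0))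
instance (matrix_sizes : List Int) (threads_list : List Int) (modes : List String) (a_vals : List Int) (b_vals : List Int) : Decidable (Pre_build_config_list matrix_sizes threads_list modes a_vals b_vals) := by unfold Pre_build_config_list; infer_instance

def pvWitness_build_config_list : List Int × List Int × List String × List Int × List Int :=
  ([4, 6], [1, 2], ["static"], [2], [2, 4])

def Spec_build_config_list (matrix_sizes : List Int) (threads_list : List Int) (modes : List String) (a_vals : List Int) (b_vals : List Int) (out : List (Int × List (Int × Int × String × Int × Int))) : Prop := out = build_config_list_alt matrix_sizes threads_list modes a_vals b_vals
instance (matrix_sizes : List Int) (threads_list : List Int) (modes : List String) (a_vals : List Int) (b_vals : List Int) (out : List (Int × List (Int × Int × String × Int × Int))) : Decidable (Spec_build_config_list matrix_sizes threads_list modes a_vals b_vals out) := by unfold Spec_build_config_list; exact @List.hasDecEq _ instDecidableEqProd _ _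

-- ===== CLAIM (what is proved, stated in full; the proofs are below) =====
def Claim_equal_build_config_list : Prop := ∀ (matrix_sizes : List Int) (threads_list : List Int) (modes : List String) (a_vals : List Int) (b_vals : List Int), Dom_build_config_list matrix_sizes threads_list modes a_vals b_vals → Pre_build_config_list matrix_sizes threads_list modes a_vals b_vals → Spec_build_config_list matrix_sizes threads_list modes a_vals b_vals (build_config_list matrix_sizes threads_list modes a_vals b_vals)

-- ===== LEMMAS AND PROOFS =====

-- the full list of tuples one matrix size contributes, in A's emission order
def pvEmit (n : Int) (threads_list : List Int) (modes : List String) (a_vals b_vals : List Int) : List (Int × Int × String × Int × Int) :=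
  threads_list.flatMap (fun t => modes.flatMap (fun mode =>
    (pvPairs n a_vals b_vals).map (fun p => (n, t, mode, p.1, p.2))))

theorem pv_modify_modify {ν : Type} (d : PySem.Dict Int (List ν)) (n : Int) (xs ys : List ν) :
    (d.modify n [] (· ++ xs)).modify n [] (· ++ ys) = d.modify n [] (· ++ (xs ++ ys)) := by
  simp [PySem.Dict.modify, PySem.Dict.getD_insert_self, PySem.Dict.insert_insert_self,
    List.append_assoc]

theorem pv_foldl_modify_singleton {ν : Type} (n : Int) :
    ∀ (xs : List ν) (d : PySem.Dict Int (List ν)), xs ≠ [] →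
      xs.foldl (fun d x => d.modify n [] (· ++ [x])) d = d.modify n [] (· ++ xs)
  | [], _, h => absurd rfl h
  | [x], d, _ => by simp
  | x :: y :: xs, d, _ => by
    rw [List.foldl_cons, pv_foldl_modify_singleton n (y :: xs) _ (by simp), pv_modify_modify]
    rfl

theorem pv_emit_foldl (n : Int) (threads_list : List Int) (modes : List String)
    (a_vals b_vals : List Int) (d : PySem.Dict Int (List (Int × Int × String × Int × Int))) :
    (pvEmit n threads_list modes a_vals b_vals).foldl (fun d x => d.modify n [] (· ++ [x])) d =
      threads_list.foldl (fun d t =>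
        modes.foldl (fun d mode =>
          a_vals.foldl (fun d a =>
            b_vals.foldl (fun d b =>
              if pvCond n a b then d.modify n [] (· ++ [(n, t, mode, a, b)]) else d) d) d) d) d := by
  simp only [pvEmit, pvPairs, List.foldl_flatMap, List.foldl_map, List.foldl_filter]

theorem pv_bstep_eq (n : Int) (threads_list : List Int) (modes : List String)
    (a_vals b_vals : List Int) (o : PySem.Dict Int (List (Int × Int × String × Int × Int))) :
    (if pvPairs n a_vals b_vals ≠ [] then
        threads_list.foldl (fun o t =>
          modes.foldl (fun o mode =>
            o.modify n [] (· ++ (pvPairs n a_vals b_vals).map (fun p => (n, t, mode, p.1, p.2)))) o) o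
      else o) =
      (pvEmit n threads_list modes a_vals b_vals).foldl (fun d x => d.modify n [] (· ++ [x])) o := by
  by_cases hp : pvPairs n a_vals b_vals = []
  · have he : pvEmit n threads_list modes a_vals b_vals = [] := by
      simp [pvEmit, hp]
    simp [hp, he]
  · rw [if_pos hp]
    simp only [pvEmit, List.foldl_flatMap]
    refine PySem.List.foldl_congr_mem threads_list _ _ _ (fun o' t _ => ?_)
    refine PySem.List.foldl_congr_mem modes _ _ _ (fun o'' mode _ => ?_)
    rw [pv_foldl_modify_singleton n _ _ (by simpa using hp)]

theorem pv_main (threads_list : List Int) (modes : List String) (a_vals b_vals : List Int) :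
    ∀ (ms : List Int) (c : PySem.Dict Int (List (Int × Int)))
      (d : PySem.Dict Int (List (Int × Int × String × Int × Int))),
      (∀ k v, c.get? k = some v → v = pvPairs k a_vals b_vals) →
      (ms.foldl (fun (st : PySem.Dict Int (List (Int × Int)) × PySem.Dict Int (List (Int × Int × String × Int × Int))) n =>
          let cache := if st.1.contains n then st.1 else st.1.insert n (pvPairs n a_vals b_vals)
          let pairs := cache.getD n []
          let out :=
            if pairs ≠ [] then
              threads_list.foldl (fun o t =>
                modes.foldl (fun o mode =>
                  o.modify n [] (· ++ pairs.map (fun p => (n, t, mode, p.1, p.2)))) o) st.2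
            else st.2
          (cache, out)) (c, d)).2 =
      ms.foldl (fun d n =>
        threads_list.foldl (fun d t =>
          modes.foldl (fun d mode =>
            a_vals.foldl (fun d a =>
              b_vals.foldl (fun d b =>
                if pvCond n a b then d.modify n [] (· ++ [(n, t, mode, a, b)]) else d) d) d) d) d) d
  | [], c, d, _ => rfl
  | n :: ms, c, d, hc => by
    rw [List.foldl_cons, List.foldl_cons]
    have hpairs : (if c.contains n then c else c.insert n (pvPairs n a_vals b_vals)).getD n [] =
        pvPairs n a_vals b_vals := by
      by_cases h : c.contains n = true
      · rw [if_pos h]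
        have hs : (c.get? n).isSome := by
          rw [← PySem.Dict.contains_eq_isSome_get? c n]; exact h
        rcases Option.isSome_iff_exists.mp hs with ⟨v, hv⟩
        rw [PySem.Dict.getD_of_get?_eq_some c [] hv]
        exact hc n v hv
      · rw [if_neg h, PySem.Dict.getD_insert_self]
    have hc' : ∀ k v, (if c.contains n then c else c.insert n (pvPairs n a_vals b_vals)).get? k = some v →
        v = pvPairs k a_vals b_vals := by
      by_cases h : c.contains n = true
      · rw [if_pos h]; exact hc
      · rw [if_neg h]
        intro k v hv
        rw [PySem.Dict.get?_insert] at hv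
        by_cases hk : k = n
        · rw [if_pos hk] at hv; subst hk; injection hv with h'; exact h'.symm
        · rw [if_neg hk] at hv; exact hc k v hv
    rw [pv_main threads_list modes a_vals b_vals ms _ _ hc']
    congr 1
    simp only [hpairs]
    rw [pv_bstep_eq, pv_emit_foldl]

-- when threads_list or modes is empty A's fold never changes the dict
theorem pv_a_empty (threads_list : List Int) (modes : List String) (a_vals b_vals : List Int)
    (hemp : threads_list = [] ∨ modes = []) :
    ∀ (ms : List Int) (d : PySem.Dict Int (List (Int × Int × String × Int × Int))),
      ms.foldl (fun d n =>
        threads_list.foldl (fun d t =>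
          modes.foldl (fun d mode =>
            a_vals.foldl (fun d a =>
              b_vals.foldl (fun d b =>
                if pvCond n a b then d.modify n [] (· ++ [(n, t, mode, a, b)]) else d) d) d) d) d) d = d
  | [], _ => rfl
  | n :: ms, d => by
    rw [List.foldl_cons]
    have hstep : (threads_list.foldl (fun d t =>
        modes.foldl (fun d mode =>
          a_vals.foldl (fun d a =>
            b_vals.foldl (fun d b =>
              if pvCond n a b then d.modify n [] (· ++ [(n, t, mode, a, b)]) else d) d) d) d) d) = d := by
      rcases hemp with h | h
      · rw [h]; rfl
      · subst h
        simp
    rw [hstep]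
    exact pv_a_empty threads_list modes a_vals b_vals hemp ms d

-- ===== VERDICT (by name: the statement is the Claim_ definition above) =====
theorem build_config_list_spec : Claim_equal_build_config_list := by
  intro matrix_sizes threads_list modes a_vals b_vals _ _
  unfold Spec_build_config_list build_config_list build_config_list_alt
  by_cases hemp : threads_list.isEmpty || modes.isEmpty
  · rw [if_pos hemp]
    have h : threads_list = [] ∨ modes = [] := by
      rcases Bool.or_eq_true_iff.mp hemp with h | h
      · exact Or.inl (List.isEmpty_iff.mp h)
      · exact Or.inr (List.isEmpty_iff.mp h)
    rw [pv_a_empty threads_list modes a_vals b_vals h matrix_sizes PySem.Dict.empty]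
  · rw [if_neg hemp]
    rw [pv_main threads_list modes a_vals b_vals matrix_sizes PySem.Dict.empty PySem.Dict.empty
      (by intro k v hv; simp [PySem.Dict.get?_empty] at hv)]
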